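-- pv_equiv track=rewrite | github.com/anmuhina/pythonProject | lab1/task16.py | countMin
-- ===== SOURCE A (Python) =====
-- def countMin(arr, a, b):
--     k = 0
--     new_arr = []
--     for i in arr:
--         if a < i < b:
--             new_arr.append(i)
--     minimum = min(new_arr)
--     for i in new_arr:
--         if i == minimum:
--             k += 1
--     return k
-- ===== SOURCE B (Python) =====
-- def countMin(arr, a, b):
--     minimum = None
--     k = 0
--     for i in arr:
--         if a < i < b:
--             if minimum is None or i < minimum:
--                 minimum = i
--                 k = 1
--             elif i == minimum:
--                 k += 1
--     if minimum is None:
--         raise ValueError("min() arg is an empty sequence")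
--     return k
-- ===== Notes on version B (the rewrite author's own statement) =====
-- stated objective: alternative
-- what changed: B replaces A's three passes (build a filtered list, min() over it, then a counting pass) by one fold over arr keeping a running minimum and its count, with no intermediate list.
import Mathlib
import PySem

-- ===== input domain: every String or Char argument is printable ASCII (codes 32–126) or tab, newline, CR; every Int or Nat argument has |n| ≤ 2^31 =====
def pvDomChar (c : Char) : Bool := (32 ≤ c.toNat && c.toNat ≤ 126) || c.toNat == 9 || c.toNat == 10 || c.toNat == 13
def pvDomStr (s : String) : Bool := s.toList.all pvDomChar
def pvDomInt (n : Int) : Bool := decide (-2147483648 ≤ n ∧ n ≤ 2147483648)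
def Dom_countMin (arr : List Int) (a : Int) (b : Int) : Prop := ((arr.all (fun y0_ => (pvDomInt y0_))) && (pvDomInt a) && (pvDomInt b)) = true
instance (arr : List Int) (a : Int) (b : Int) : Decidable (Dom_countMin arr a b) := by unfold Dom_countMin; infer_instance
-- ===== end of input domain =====

-- B does the counting in ONE pass with a running minimum and its count, instead of A's
-- intermediate filtered list followed by separate min() and counting passes.

-- ===== PORT A =====
def countMin (arr : List Int) (a : Int) (b : Int) : Int :=
  -- k = 0; new_arr = []; for i in arr: if a < i < b: new_arr.append(i)
  let new_arr := arr.foldl (fun acc i => if a < i ∧ i < b then acc ++ [i] else acc) []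
  -- minimum = min(new_arr)  (min([]) raises ValueError: excluded by Pre_countMin)
  match PySem.List.min? new_arr (fun x => x) with
  | none => 0
  | some minimum =>
    -- for i in new_arr: if i == minimum: k += 1
    new_arr.foldl (fun k i => if i = minimum then k + 1 else k) 0

-- ===== PORT B =====
-- one step of B's loop body (the part under 'if a < i < b')
def cmStep (st : Option Int × Int) (i : Int) : Option Int × Int :=
  match st.1 with
  | none => (some i, 1)
  | some m => if i < m then (some i, 1) else if i = m then (some m, st.2 + 1) else st

def countMin_alt (arr : List Int) (a : Int) (b : Int) : Int :=
  let st := arr.foldl (fun st i => if a < i ∧ i < b then cmStep st i else st)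
    ((none : Option Int), (0 : Int))
  match st.1 with
  | none => 0  -- Python B raises ValueError here; excluded by Pre_countMin
  | some _ => st.2

-- ===== PRECONDITION & SPEC =====
-- Pre_ excludes exactly the inputs where no element lies strictly between a and b:
-- there A's min([]) (and B's explicit raise) raises ValueError.
def Pre_countMin (arr : List Int) (a : Int) (b : Int) : Prop := ∃ i ∈ arr, a < i ∧ i < b
instance (arr : List Int) (a : Int) (b : Int) : Decidable (Pre_countMin arr a b) := by
  unfold Pre_countMin; infer_instance
def pvWitness_countMin : List Int × Int × Int := ([1, 3, 1], 0, 2)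

def Spec_countMin (arr : List Int) (a : Int) (b : Int) (out : Int) : Prop := out = countMin_alt arr a b
instance (arr : List Int) (a : Int) (b : Int) (out : Int) : Decidable (Spec_countMin arr a b out) := by unfold Spec_countMin; infer_instance

-- ===== CLAIM (what is proved, stated in full; the proofs are below) =====
def Claim_equal_countMin : Prop := ∀ (arr : List Int) (a : Int) (b : Int), Dom_countMin arr a b → Pre_countMin arr a b → Spec_countMin arr a b (countMin arr a b)

-- ===== LEMMAS AND PROOFS =====

lemma foldl_min_le (ys : List Int) (m : Int) : ys.foldl min m ≤ m := by
  induction ys generalizing m with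
  | nil => simp
  | cons x ys ih => exact le_trans (ih (min m x)) (min_le_left m x)

lemma countA_fold (ys : List Int) (M : Int) (k : Int) :
    ys.foldl (fun k i => if i = M then k + 1 else k) k = k + (ys.count M : Int) := by
  induction ys generalizing k with
  | nil => simp
  | cons x ys ih =>
    simp only [List.foldl_cons, List.count_cons, ih]
    by_cases h : x = M <;> simp [h] <;> push_cast <;> ring

lemma cmStep_fwd (ys : List Int) (m : Int) (k : Int) :
    ys.foldl cmStep (some m, k) =
      (some (ys.foldl min m),
       (if ys.foldl min m = m then k else 0) + (ys.count (ys.foldl min m) : Int)) := by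
  induction ys generalizing m k with
  | nil => simp
  | cons x ys ih =>
    simp only [List.foldl_cons, List.count_cons]
    rcases lt_trichotomy x m with h | h | h
    · have hm : min m x = x := min_eq_right h.le
      rw [show cmStep (some m, k) x = (some x, 1) by simp [cmStep, h], ih]
      simp only [hm]
      have hle := foldl_min_le ys x
      have hne : ys.foldl min x ≠ m := by omega
      by_cases hx : ys.foldl min x = x <;> simp [hx, hne] <;> push_cast <;> omega
    · subst h
      have hm : min x x = x := min_self x
      rw [show cmStep (some x, k) x = (some x, k + 1) by simp [cmStep], ih]
      simp only [hm]
      by_cases hx : ys.foldl min x = x <;> simp [hx] <;> push_cast <;> omega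
    · have hm : min m x = m := min_eq_left h.le
      have hstep : cmStep (some m, k) x = (some m, k) := by
        unfold cmStep
        simp only
        rw [if_neg (by omega), if_neg (by omega)]
      rw [hstep, ih]
      simp only [hm]
      have hle := foldl_min_le ys m
      have hne : ys.foldl min m ≠ x := by omega
      have hne' : x ≠ ys.foldl min m := by omega
      simp [hne, hne']

theorem countMin_spec : Claim_equal_countMin := by
  intro arr a b _ hpre
  unfold Spec_countMin countMin countMin_alt
  rw [PySem.List.foldl_append_ite_eq_filter (p := fun i => a < i ∧ i < b),
      PySem.List.foldl_ite_eq_foldl_filter (p := fun i => a < i ∧ i < b)]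
  simp only [List.nil_append]
  obtain ⟨i, hi, hab⟩ := hpre
  have hne : arr.filter (fun i => decide (a < i ∧ i < b)) ≠ [] := by
    have : i ∈ arr.filter (fun i => decide (a < i ∧ i < b)) := by
      rw [List.mem_filter]; exact ⟨hi, by simp [hab.1, hab.2]⟩
    exact List.ne_nil_of_mem this
  obtain ⟨y, t, heq⟩ := List.exists_cons_of_ne_nil hne
  rw [heq, PySem.List.min?_id_cons]
  simp only [List.foldl_cons, show cmStep (none, 0) y = (some y, 1) by rfl]
  rw [cmStep_fwd, countA_fold]
  have hle := foldl_min_le t y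
  by_cases hx : t.foldl min y = y
  · simp only [hx, if_pos rfl, List.count_cons, beq_self_eq_true, if_pos trivial]
    push_cast
    omega
  · have hyx : y ≠ t.foldl min y := fun h => hx h.symm
    simp [hx, hyx]

-- ===== VERDICT (by name: the statement is the Claim_ definition above) =====
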